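-- pv_equiv track=rewrite | github.com/kvm777/python-codes-for-practice | UNKNOWNS/jan20_1.py | maxmarks
-- ===== SOURCE A (Python) =====
-- def maxmarks(input1,input2):
--
--     #write code here
--     n=input1
--     a=input2
--     if n==len(set(a)):
--         return sum(a)
--     else:
--         f=sum(set(a))
--         t=[]
--         for i in a:
--             if a.count(i)>1:
--                 t.append(i)
--         s = set(t)
--         f+=0
--         x=max(t)+1
--         for i in range(len(t)-len(s)):
--             f+=x
--             x+=1
--         return f
-- ===== SOURCE B (Python) =====
-- def maxmarks(input1, input2):
--     counts = {}
--     for v in input2: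
--         counts[v] = counts.get(v, 0) + 1
--     if input1 == len(counts):
--         return sum(input2)
--     k = len(input2) - len(counts)
--     x = max(v for v, c in counts.items() if c > 1) + 1
--     return sum(counts) + k * x + k * (k - 1) // 2
-- ===== Notes on version B (the rewrite author's own statement) =====
-- stated objective: alternative
-- what changed: B replaces A's quadratic a.count(i) scan per element with a single-pass counter dict, and replaces A's accumulation loop over range(len(t)-len(s)) with the arithmetic-series closed form k*x + k*(k-1)//2; O(n) instead of O(n^2), though a timing run could not measure it.
import Mathlib
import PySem

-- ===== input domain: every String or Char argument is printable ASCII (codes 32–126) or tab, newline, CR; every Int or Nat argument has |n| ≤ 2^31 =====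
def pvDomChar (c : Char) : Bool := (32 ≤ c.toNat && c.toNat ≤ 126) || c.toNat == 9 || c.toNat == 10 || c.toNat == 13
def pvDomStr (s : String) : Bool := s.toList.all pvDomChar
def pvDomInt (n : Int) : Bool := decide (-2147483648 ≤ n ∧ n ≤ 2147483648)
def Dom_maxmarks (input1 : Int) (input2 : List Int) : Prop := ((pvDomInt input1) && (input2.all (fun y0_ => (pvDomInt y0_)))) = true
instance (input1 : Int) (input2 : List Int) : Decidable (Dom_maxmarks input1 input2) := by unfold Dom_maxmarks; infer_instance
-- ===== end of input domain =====

-- B replaces A's quadratic per-element count scan by a one-pass counter dict and A's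
-- accumulation loop by the arithmetic-series closed form; equivalence proved on Pre_.


-- ===== PORT A =====
-- literal port of Source A; max(t) raises ValueError in Python when t = [] — that input is
-- excluded by Pre_maxmarks, the port uses .getD 0 there.
def maxmarks (input1 : Int) (input2 : List Int) : Int :=
  let n := input1
  let a := input2
  if n = ((PySem.Set.ofList a).length : Int) then
    a.sum
  else
    let f := (PySem.Set.ofList a).sum
    let t := a.filter (fun i => decide (1 < PySem.List.count a i))
    let s : PySem.Set Int := PySem.Set.ofList t
    let f := f + 0
    let x := (PySem.List.max? t (fun v => v)).getD 0 + 1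
    let loop := (PySem.List.pyRange 0 ((t.length : Int) - (s.length : Int)) 1).foldl
        (fun st _ => (st.1 + st.2, st.2 + 1)) (f, x)
    loop.1

-- ===== PORT B =====
-- literal port of Source B; the max(...) generator raises ValueError in Python when empty —
-- excluded by Pre_maxmarks, the port uses .getD 0 there.
def maxmarks_alt (input1 : Int) (input2 : List Int) : Int :=
  let counts : PySem.Dict Int Int := input2.foldl (fun d v => d.insert v (d.getD v 0 + 1)) PySem.Dict.empty
  if input1 = (counts.size : Int) then
    input2.sum
  else
    let k : Int := (input2.length : Int) - (counts.size : Int)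
    let x := (PySem.List.max? ((counts.items.filter (fun p => decide (1 < p.2))).map (fun p => p.1))
                (fun v => v)).getD 0 + 1
    counts.keys.sum + k * x + PySem.Int.floordiv (k * (k - 1)) 2

-- ===== PRECONDITION & SPEC =====
-- Pre_ excludes exactly the inputs where A (and B) raise ValueError: max of an empty list,
-- reached when input1 differs from the number of distinct elements and input2 has no duplicate.
def Pre_maxmarks (input1 : Int) (input2 : List Int) : Prop :=
  input1 = ((PySem.Set.ofList input2).length : Int) ∨ ¬ input2.Nodup
instance (input1 : Int) (input2 : List Int) : Decidable (Pre_maxmarks input1 input2) := by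
  unfold Pre_maxmarks; infer_instance

def pvWitness_maxmarks : Int × List Int := (5, [1, 1, 2])

def Spec_maxmarks (input1 : Int) (input2 : List Int) (out : Int) : Prop := out = maxmarks_alt input1 input2
instance (input1 : Int) (input2 : List Int) (out : Int) : Decidable (Spec_maxmarks input1 input2 out) := by unfold Spec_maxmarks; infer_instance

-- ===== CLAIM (what is proved, stated in full; the proofs are below) =====
def Claim_equal_maxmarks : Prop := ∀ (input1 : Int) (input2 : List Int), Dom_maxmarks input1 input2 → Pre_maxmarks input1 input2 → Spec_maxmarks input1 input2 (maxmarks input1 input2)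

-- ===== LEMMAS AND PROOFS =====

-- the counter's size is the number of distinct elements
theorem counter_size_eq (xs : List Int) :
    (PySem.Dict.counter xs).size = (PySem.Set.ofList xs).length := by
  have h := PySem.Dict.keys_counter xs
  simpa [PySem.Dict.size, PySem.Dict.keys, List.length_map] using congrArg List.length h

-- set-of-a-filter is the filter of the set (both keep first occurrences, in order)
theorem ofList_filter (p : Int → Bool) (xs : List Int) :
    PySem.Set.ofList (xs.filter p) = (PySem.Set.ofList xs).filter p := by
  induction xs with
  | nil => simp [PySem.Set.ofList_nil]
  | cons x xs ih =>
    cases hx : p x with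
    | true =>
      simp [hx, PySem.Set.ofList_cons, ih, PySem.Set.discard,
        List.filter_filter, Bool.and_comm]
    | false =>
      simp only [List.filter_cons, hx, Bool.false_eq_true, if_false, PySem.Set.ofList_cons,
        ih, PySem.Set.discard, List.filter_filter]
      refine List.filter_congr ?_
      intro y _
      by_cases hyx : y = x
      · simp [hyx, hx]
      · simp [hyx]

-- max? with the identity key depends only on membership
theorem max?_congr_mem (xs ys : List Int) (h : ∀ v, v ∈ xs ↔ v ∈ ys) :
    PySem.List.max? xs (fun v => v) = PySem.List.max? ys (fun v => v) := by
  cases hx : PySem.List.max? xs (fun v => v) with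
  | none =>
    have : xs = [] := (PySem.List.max?_eq_none_iff xs _).mp hx
    subst this
    have hys : ys = [] := by
      cases ys with
      | nil => rfl
      | cons y ys => exact absurd ((h y).mpr (List.mem_cons_self)) (List.not_mem_nil)
    subst hys
    exact ((PySem.List.max?_eq_none_iff [] _).mpr rfl).symm
  | some m =>
    cases hy : PySem.List.max? ys (fun v => v) with
    | none =>
      have : ys = [] := (PySem.List.max?_eq_none_iff ys _).mp hy
      subst this
      exact absurd ((h m).mp (PySem.List.max?_mem hx)) (List.not_mem_nil)
    | some m' =>
      have h1 : m ≤ m' := PySem.List.max?_isMax hy m ((h m).mp (PySem.List.max?_mem hx))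
      have h2 : m' ≤ m := PySem.List.max?_isMax hx m' ((h m').mpr (PySem.List.max?_mem hy))
      simp [le_antisymm h1 h2]

-- the duplicate occurrences: len(t) - len(set(t)) = len(a) - len(set(a))
theorem dup_count_eq (a : List Int) :
    (a.filter (fun i => decide (1 < PySem.List.count a i))).length
      + (PySem.Set.ofList a).length
    = a.length
      + (PySem.Set.ofList (a.filter (fun i => decide (1 < PySem.List.count a i)))).length := by
  set p : Int → Bool := fun i => decide (1 < PySem.List.count a i) with hp
  have hpart : a.length = (a.filter p).length + (a.filter (fun x => !p x)).length :=
    List.length_eq_length_filter_add p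
  have hnodup : (a.filter (fun x => !p x)).Nodup := by
    rw [List.nodup_iff_count_le_one]
    intro v
    by_cases hv : p v = true
    · have : v ∉ a.filter (fun x => !p x) := by simp [List.mem_filter, hv]
      simp [List.count_eq_zero.mpr this]
    · have h1 : List.count v (a.filter (fun x => !p x)) ≤ List.count v a :=
        List.Sublist.count_le v (List.filter_sublist (p := fun x => !p x) (l := a))
      have h2 : List.count v a ≤ 1 := by
        simp only [hp, decide_eq_true_eq, not_lt, PySem.List.count_eq] at hv
        simpa using hv
      omega
  have hsetpart : (PySem.Set.ofList a).length
      = ((PySem.Set.ofList a).filter p).length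
        + ((PySem.Set.ofList a).filter (fun x => !p x)).length :=
    List.length_eq_length_filter_add p
  have hfp : ((PySem.Set.ofList a).filter p).length
      = (PySem.Set.ofList (a.filter p)).length := by rw [ofList_filter]
  have hfnp : ((PySem.Set.ofList a).filter (fun x => !p x)).length
      = (a.filter (fun x => !p x)).length := by
    rw [← ofList_filter, PySem.Set.ofList_eq_self_of_nodup _ hnodup]
  omega

-- A's accumulation loop in closed form
theorem loop_closed (m : Nat) (f x : Int) :
    (PySem.List.pyRange 0 (m : Int) 1).foldl (fun st _ => (st.1 + st.2, st.2 + 1)) (f, x)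
      = (f + m * x + ((m * (m - 1) / 2 : Nat) : Int), x + m) := by
  induction m generalizing f x with
  | zero => simp [PySem.List.pyRange_one_eq_nil]
  | succ m ih =>
    have hcast : ((m + 1 : Nat) : Int) = (m : Int) + 1 := by push_cast; ring
    rw [hcast, PySem.List.pyRange_one_succ_right (by positivity), List.foldl_append, ih]
    have htri : (m + 1) * m / 2 = m * (m - 1) / 2 + m := by
      have h1 := Finset.sum_range_id_mul_two m
      have h2 := Finset.sum_range_id_mul_two (m + 1)
      rw [Finset.sum_range_succ] at h2
      simp only [Nat.add_sub_cancel] at h2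
      generalize hq : m * (m - 1) = q at h1 ⊢
      generalize hr : (m + 1) * m = r at h2 ⊢
      omega
    simp only [List.foldl_cons, List.foldl_nil]
    refine Prod.ext ?_ ?_
    · show f + ↑m * x + ↑(m * (m - 1) / 2) + (x + ↑m) = f + (↑m + 1) * x + ↑((m + 1) * m / 2)
      rw [htri]; push_cast; ring
    · show x + ↑m + 1 = x + (↑m + 1)
      ring

-- k * (k-1) // 2 at k = ↑m is the Nat triangular number
theorem floordiv_tri (m : Nat) :
    PySem.Int.floordiv ((m : Int) * ((m : Int) - 1)) 2 = ((m * (m - 1) / 2 : Nat) : Int) := by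
  rw [PySem.Int.floordiv_eq_ediv_of_pos (by norm_num)]
  cases m with
  | zero => simp
  | succ m =>
    have : ((m + 1 : Nat) : Int) * (((m + 1 : Nat) : Int) - 1) = (((m + 1) * m : Nat) : Int) := by
      push_cast; ring
    rw [this, Int.natCast_ediv]
    norm_num

theorem maxmarks_eq (input1 : Int) (input2 : List Int) (hpre : Pre_maxmarks input1 input2) :
    maxmarks input1 input2 = maxmarks_alt input1 input2 := by
  simp only [maxmarks, maxmarks_alt]
  have hc : List.foldl (fun (d : PySem.Dict Int Int) v => d.insert v (d.getD v 0 + 1))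
      PySem.Dict.empty input2 = PySem.Dict.counter input2 :=
    PySem.Dict.foldl_insert_getD_add_one_eq_counter input2
  rw [hc, counter_size_eq]
  by_cases hguard : input1 = ((PySem.Set.ofList input2).length : Int)
  · simp [hguard]
  · simp only [if_neg hguard]
    -- in the else branch Pre_ gives a duplicate, so t is nonempty
    have hdup : ¬ input2.Nodup := hpre.resolve_left hguard
    set p : Int → Bool := fun i => decide (1 < PySem.List.count input2 i) with hp
    set t : List Int := input2.filter p with ht
    -- B's candidate list for max equals set(t)
    have hitems : ((PySem.Dict.counter input2).items.filter (fun q => decide (1 < q.2))).map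
        (fun q => q.1) = PySem.Set.ofList t := by
      rw [PySem.Dict.items_counter, List.filter_map, List.map_map, ht, ofList_filter]
      have hid : ((fun q : Int × Int => q.1) ∘ fun k => (k, (List.count k input2 : Int))) = id :=
        rfl
      rw [hid, List.map_id]
      refine List.filter_congr ?_
      intro v _
      simp only [Function.comp, hp, PySem.List.count_eq]
      rw [decide_eq_decide]
      omega
    -- hence the two maxima agree
    have hmax : PySem.List.max? t (fun v => v)
        = PySem.List.max? (((PySem.Dict.counter input2).items.filter
            (fun q => decide (1 < q.2))).map (fun q => q.1)) (fun v => v) := by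
      rw [hitems]
      exact max?_congr_mem _ _ (fun v => (PySem.Set.mem_ofList t v).symm)
    -- the loop length as a Nat
    have hle : (PySem.Set.ofList t).length ≤ t.length := PySem.Set.length_ofList_le t
    set m : Nat := t.length - (PySem.Set.ofList t).length with hm
    have hmA : (t.length : Int) - ((PySem.Set.ofList t).length : Int) = (m : Int) := by
      rw [hm]; omega
    have hdc := dup_count_eq input2
    have hmB : (input2.length : Int) - ((PySem.Set.ofList input2).length : Int) = (m : Int) := by
      rw [hm]
      have h1 : t.length + (PySem.Set.ofList input2).length
          = input2.length + (PySem.Set.ofList t).length := by rw [ht, hp]; exact hdc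
      omega
    rw [hmA, hmB, loop_closed, ← hmax, floordiv_tri]
    -- the sums of distinct elements agree
    have hkeys : (PySem.Dict.counter input2).keys.sum = (PySem.Set.ofList input2).sum := by
      rw [PySem.Dict.keys_counter]
    rw [hkeys]
    ring

-- ===== VERDICT (by name: the statement is the Claim_ definition above) =====
theorem maxmarks_spec : Claim_equal_maxmarks := by
  intro input1 input2 _ hpre
  unfold Spec_maxmarks
  exact maxmarks_eq input1 input2 hpre
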